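-- pv_equiv track=rewrite | github.com/DL-art-WEB/https-github.com-open-mmlab-mmsegmentation | my_projects/conversion_tests/scripts/organise_conversion_data.py | remove_unknown_labels
-- ===== SOURCE A (Python) =====
-- def remove_unknown_labels(
--     label_data: dict,
--     unknown_labels: list
-- ) -> dict:
--     fixed_dict = {}
--     for class_label, value in label_data.items():
--         if class_label in unknown_labels:
--             continue
--         fixed_dict[class_label] = value
--     return fixed_dict
-- ===== SOURCE B (Python) =====
-- def remove_unknown_labels(
--     label_data: dict,
--     unknown_labels: list
-- ) -> dict:
--     fixed = dict(label_data)
--     for label in unknown_labels: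
--         fixed.pop(label, None)
--     return fixed
-- ===== Notes on version B (the rewrite author's own statement) =====
-- stated objective: faster
-- what changed: B copies the input dict once and pops each unknown label from the copy (a loop over the removal list, ported as structural recursion), instead of scanning the source dict and inserting survivors behind a linear list-membership test.
import Mathlib
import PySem

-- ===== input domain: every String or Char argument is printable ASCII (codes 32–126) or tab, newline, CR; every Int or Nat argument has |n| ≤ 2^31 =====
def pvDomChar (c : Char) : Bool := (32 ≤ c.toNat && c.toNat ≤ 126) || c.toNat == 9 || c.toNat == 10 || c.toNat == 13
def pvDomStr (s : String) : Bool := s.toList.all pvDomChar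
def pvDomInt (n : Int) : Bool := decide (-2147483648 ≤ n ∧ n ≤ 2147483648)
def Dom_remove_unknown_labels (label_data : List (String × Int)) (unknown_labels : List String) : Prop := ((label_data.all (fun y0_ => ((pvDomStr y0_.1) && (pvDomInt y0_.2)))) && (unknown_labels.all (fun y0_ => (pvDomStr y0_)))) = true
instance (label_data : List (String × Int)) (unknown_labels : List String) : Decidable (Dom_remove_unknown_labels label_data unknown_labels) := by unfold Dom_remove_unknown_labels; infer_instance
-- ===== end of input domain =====

-- B copies the dict once and pops each unknown label from the copy (iterating the removal list), instead of scanning the dict with a membership test per entry.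


-- ===== PORT A =====
def remove_unknown_labels (label_data : List (String × Int)) (unknown_labels : List String) : List (String × Int) :=
  (label_data.foldl
    (fun fixed_dict p =>
      if unknown_labels.contains p.1 then fixed_dict
      else fixed_dict.insert p.1 p.2)
    (PySem.Dict.empty)).items

-- ===== PORT B =====
-- B's for-loop over unknown_labels, as structural recursion on that list.
def popAll (labels : List String) (fixed : PySem.Dict String Int) : PySem.Dict String Int :=
  match labels with
  | [] => fixed
  | label :: rest => popAll rest (fixed.erase label)

def remove_unknown_labels_alt (label_data : List (String × Int)) (unknown_labels : List String) : List (String × Int) :=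
  (popAll unknown_labels (PySem.Dict.mk label_data)).items

-- ===== PRECONDITION & SPEC =====
-- Pre_ requires distinct keys: the first argument is a Python dict, whose association-list
-- representation never carries a duplicate key.
def Pre_remove_unknown_labels (label_data : List (String × Int)) (unknown_labels : List String) : Prop :=
  (label_data.map Prod.fst).Nodup
instance (label_data : List (String × Int)) (unknown_labels : List String) : Decidable (Pre_remove_unknown_labels label_data unknown_labels) := by unfold Pre_remove_unknown_labels; infer_instance

def pvWitness_remove_unknown_labels : (List (String × Int)) × List String :=
  ([("person", 1), ("car", 2), ("sky", 3)], ["car", "void"])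

def Spec_remove_unknown_labels (label_data : List (String × Int)) (unknown_labels : List String) (out : List (String × Int)) : Prop := out = remove_unknown_labels_alt label_data unknown_labels
instance (label_data : List (String × Int)) (unknown_labels : List String) (out : List (String × Int)) : Decidable (Spec_remove_unknown_labels label_data unknown_labels out) := by unfold Spec_remove_unknown_labels; infer_instance

-- ===== CLAIM (what is proved, stated in full; the proofs are below) =====
def Claim_equal_remove_unknown_labels : Prop := ∀ (label_data : List (String × Int)) (unknown_labels : List String), Dom_remove_unknown_labels label_data unknown_labels → Pre_remove_unknown_labels label_data unknown_labels → Spec_remove_unknown_labels label_data unknown_labels (remove_unknown_labels label_data unknown_labels)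

-- ===== LEMMAS AND PROOFS =====

-- B's pop loop is a single filter over the items list (no Nodup needed).
theorem alt_eq_filter (label_data : List (String × Int)) (unknown_labels : List String) :
    remove_unknown_labels_alt label_data unknown_labels
      = label_data.filter (fun p => !(unknown_labels.contains p.1)) := by
  unfold remove_unknown_labels_alt
  induction unknown_labels generalizing label_data with
  | nil => simp [popAll]
  | cons k ks ih =>
      have hstep : (PySem.Dict.mk label_data).erase k
          = PySem.Dict.mk (label_data.filter (fun p => !(p.1 == k))) := rfl
      simp only [popAll, hstep, ih, List.filter_filter]
      congr 1
      funext p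
      by_cases h : p.1 = k <;> simp [h, Bool.and_comm]

-- A's accumulation, generalized over the accumulator.
theorem a_loop_items (unknown_labels : List String) (l : List (String × Int))
    (d : PySem.Dict String Int) (hnd : d.keys.Nodup)
    (hfresh : ∀ p ∈ l, d.contains p.1 = false) (hl : (l.map Prod.fst).Nodup) :
    (l.foldl
      (fun fixed_dict p =>
        if unknown_labels.contains p.1 then fixed_dict
        else fixed_dict.insert p.1 p.2) d).items
      = d.items ++ l.filter (fun p => !(unknown_labels.contains p.1)) := by
  induction l generalizing d with
  | nil => simp
  | cons p rest ih =>
      simp only [List.map_cons, List.nodup_cons] at hl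
      by_cases hmem : unknown_labels.contains p.1
      · simp only [List.foldl_cons, List.filter_cons, hmem, Bool.not_true]
        exact ih d hnd (fun q hq => hfresh q (List.mem_cons_of_mem _ hq)) hl.2
      · simp only [List.foldl_cons, if_neg hmem]
        have hc : d.contains p.1 = false := hfresh p (List.mem_cons_self ..)
        have h1 : (d.insert p.1 p.2).items = d.items ++ [(p.1, p.2)] :=
          PySem.Dict.items_insert_of_not_contains _ _ hc
        have h2 : (d.insert p.1 p.2).keys.Nodup := PySem.Dict.nodup_keys_insert _ _ _ hnd
        have h3 : ∀ q ∈ rest, (d.insert p.1 p.2).contains q.1 = false := by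
          intro q hq
          have hne : ¬ (q.1 = p.1) := by
            intro h; exact hl.1 (h ▸ List.mem_map_of_mem hq)
          rw [PySem.Dict.contains_insert]
          simp [hne, hfresh q (List.mem_cons_of_mem _ hq)]
        rw [ih _ h2 h3 hl.2, h1, List.filter_cons]
        have hnm : p.1 ∉ unknown_labels := by simpa using hmem
        simp [hnm]

-- ===== VERDICT (by name: the statement is the Claim_ definition above) =====
theorem remove_unknown_labels_spec : Claim_equal_remove_unknown_labels := by
  intro label_data unknown_labels _ hpre
  unfold Spec_remove_unknown_labels
  rw [alt_eq_filter]
  unfold remove_unknown_labels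
  rw [a_loop_items unknown_labels label_data PySem.Dict.empty
    (by simp [PySem.Dict.keys_empty]) (by intro p _; simp [PySem.Dict.contains_empty]) hpre]
  simp [PySem.Dict.empty]
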